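-- pv_equiv track=rewrite | github.com/Youngsdg1/leetcode | 2020-01-09/1296/1296.py | ky
-- ===== SOURCE A (Python) =====
-- def ky(nums, k):
--     if len(nums)%k != 0:
--         return False
--     from collections import Counter
--     dct = dict(Counter(nums))
--     key= list(dct.keys())
--     key.sort()
--     for i in key:  # number
--         if dct[i] > 0:  # 갯수가 남아 있다면
--             for j in range(i+1,i+k):  # i 포함 k개 만큼 확인
--                 if j not in dct.keys():  # 있는 수인지
--                     return False
--                 if dct[j]<dct[i]:  # 더 큰 수의 갯수가 작으면                    return False
--                     return False
--                 dct[j]-=dct[i]  # 아니라면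
--     return True
-- ===== SOURCE B (Python) =====
-- from collections import Counter, deque
--
--
-- def ky(nums, k):
--     if len(nums) % k != 0:
--         return False
--     cnt = Counter(nums)
--     keys = sorted(cnt)
--     dq = deque()          # (start value, groups opened there), starts increasing
--     active = 0            # total groups currently covering the value being swept
--     for i, v in enumerate(keys):
--         while dq and dq[0][0] + k <= v:
--             active -= dq.popleft()[1]
--         c = cnt[v]
--         if c < active:
--             return False
--         if c > active:
--             j = i + k - 1
--             if j >= len(keys) or keys[j] != v + k - 1:
--                 return False
--             dq.append((v, c - active))
--             active = c
--     return True
-- ===== Notes on version B (the rewrite author's own statement) =====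
-- stated objective: alternative
-- what changed: A mutates a Counter dict and, for every value with a remaining count, rescans and decrements all k-1 successor counts; B sweeps the sorted distinct values once, maintaining a deque of (start, groups) for currently open runs and a running 'active' total, and checks run feasibility with a single index probe keys[i+k-1] == v+k-1 instead of scanning the window.
-- outside the precondition, e.g. on ky([1, 3], -2): A returns True, B raises IndexError; on ky([1, 2], -2): A returns True, B raises IndexError
import Mathlib
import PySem

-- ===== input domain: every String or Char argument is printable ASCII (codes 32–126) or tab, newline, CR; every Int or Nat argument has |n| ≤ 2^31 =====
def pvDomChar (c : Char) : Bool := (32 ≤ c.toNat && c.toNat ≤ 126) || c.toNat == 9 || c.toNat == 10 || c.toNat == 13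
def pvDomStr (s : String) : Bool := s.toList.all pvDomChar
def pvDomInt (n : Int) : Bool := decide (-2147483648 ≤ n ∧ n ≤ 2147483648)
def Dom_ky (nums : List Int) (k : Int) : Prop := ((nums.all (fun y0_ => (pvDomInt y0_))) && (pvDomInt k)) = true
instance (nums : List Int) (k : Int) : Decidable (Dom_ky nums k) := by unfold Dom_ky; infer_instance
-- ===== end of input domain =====

-- B replaces A's per-value rescan of the next k-1 counts by a single sweep with a deque of open
-- groups and one sorted-index probe per opening value (objective: alternative decomposition).

-- ===== PORT A =====
-- inner loop `for j in range(i+1, i+k): …` (early `return False` becomes Option: none)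
def kyInner (r : Int) : List Int → PySem.Dict Int Int → Option (PySem.Dict Int Int)
  | [], dct => some dct
  | j :: rest, dct =>
    if PySem.Dict.contains dct j = false then none
    else if PySem.Dict.getD dct j 0 < r then none
    else kyInner r rest (PySem.Dict.insert dct j (PySem.Dict.getD dct j 0 - r))

-- outer loop over the sorted keys
def kyOuter (k : Int) : List Int → PySem.Dict Int Int → Bool
  | [], _ => true
  | v :: rest, dct =>
    if 0 < PySem.Dict.getD dct v 0 then
      match kyInner (PySem.Dict.getD dct v 0) (PySem.List.pyRange (v + 1) (v + k) 1) dct with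
      | none => false
      | some dct' => kyOuter k rest dct'
    else kyOuter k rest dct

def ky (nums : List Int) (k : Int) : Bool :=
  if PySem.Int.mod (nums.length : Int) k ≠ 0 then false
  else
    kyOuter k
      (PySem.List.sorted (PySem.Dict.keys (PySem.Dict.counter nums)) (fun x => x) false)
      (PySem.Dict.counter nums)

-- ===== PORT B =====
-- `while dq and dq[0][0] + k <= v: active -= dq.popleft()[1]`
def kyPop (k v : Int) : List (Int × Int) → Int → List (Int × Int) × Int
  | [], active => ([], active)
  | (u, g) :: rest, active =>
    if u + k ≤ v then kyPop k v rest (active - g) else ((u, g) :: rest, active)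

-- `for i, v in enumerate(keys): …` over the enumerated sorted keys
def kySweep (keys : List Int) (cnt : PySem.Dict Int Int) (k : Int) :
    List (Int × Int) → List (Int × Int) → Int → Bool
  | [], _, _ => true
  | (i, v) :: restE, dq, active =>
    let p := kyPop k v dq active
    let c := PySem.Dict.getD cnt v 0
    if c < p.2 then false
    else if p.2 < c then
      if i + k - 1 ≥ (keys.length : Int) then false
      else if PySem.List.pyGet? keys (i + k - 1) ≠ some (v + k - 1) then false
        -- `keys[j]` via pyGet?: exact for the nonnegative j every k ≥ 1 (Pre_ky) produces
      else kySweep keys cnt k restE (p.1 ++ [(v, c - p.2)]) c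
    else kySweep keys cnt k restE p.1 p.2

def ky_alt (nums : List Int) (k : Int) : Bool :=
  if PySem.Int.mod (nums.length : Int) k ≠ 0 then false
  else
    kySweep (PySem.List.sorted (PySem.Dict.keys (PySem.Dict.counter nums)) (fun x => x) false)
      (PySem.Dict.counter nums) k
      (PySem.List.enumerate
        (PySem.List.sorted (PySem.Dict.keys (PySem.Dict.counter nums)) (fun x => x) false) 0)
      [] 0

-- ===== PRECONDITION & SPEC =====
-- Pre_ excludes k = 0, where A raises ZeroDivisionError, and negative k with len(nums) % k == 0,
-- where A's True (a nonsensical group length) is an accident of its empty inner range.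
def Pre_ky (nums : List Int) (k : Int) : Prop :=
  1 ≤ k ∨ (k < 0 ∧ PySem.Int.mod (nums.length : Int) k ≠ 0)
instance (nums : List Int) (k : Int) : Decidable (Pre_ky nums k) := by unfold Pre_ky; infer_instance
def pvWitness_ky : List Int × Int := ([1, 2, 3, 2, 3, 4], 3)

def Spec_ky (nums : List Int) (k : Int) (out : Bool) : Prop := out = ky_alt nums k
instance (nums : List Int) (k : Int) (out : Bool) : Decidable (Spec_ky nums k out) := by unfold Spec_ky; infer_instance

-- ===== CLAIM (what is proved, stated in full; the proofs are below) =====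
def Claim_equal_ky : Prop := ∀ (nums : List Int) (k : Int), Dom_ky nums k → Pre_ky nums k → Spec_ky nums k (ky nums k)

-- ===== LEMMAS AND PROOFS =====

-- total number of groups in dq still covering the value w
def Sdq (k : Int) (dq : List (Int × Int)) (w : Int) : Int :=
  ((dq.filter (fun p => w < p.1 + k)).map Prod.snd).sum

lemma Sdq_cons (k w : Int) (p : Int × Int) (dq : List (Int × Int)) :
    Sdq k (p :: dq) w = (if w < p.1 + k then p.2 else 0) + Sdq k dq w := by
  by_cases h : w < p.1 + k <;> simp [Sdq, h]

lemma Sdq_append_single (k w : Int) (dq : List (Int × Int)) (p : Int × Int) :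
    Sdq k (dq ++ [p]) w = Sdq k dq w + (if w < p.1 + k then p.2 else 0) := by
  by_cases h : w < p.1 + k <;> simp [Sdq, List.filter_append, h]

lemma Sdq_filter (k v w : Int) (dq : List (Int × Int)) (hvw : v ≤ w) :
    Sdq k (dq.filter (fun p => v < p.1 + k)) w = Sdq k dq w := by
  induction dq with
  | nil => rfl
  | cons p rest ih =>
    rw [List.filter_cons]
    by_cases h1 : v < p.1 + k
    · rw [if_pos (by simpa using h1), Sdq_cons, Sdq_cons, ih]
    · have h2 : ¬ (w < p.1 + k) := by omega
      rw [if_neg (by simpa using h1), Sdq_cons, if_neg h2, ih]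
      omega

lemma kyPop_spec (k v : Int) : ∀ (dq : List (Int × Int)) (active : Int),
    dq.Pairwise (fun p q => p.1 < q.1) →
    active = (dq.map Prod.snd).sum →
    kyPop k v dq active = (dq.filter (fun p => v < p.1 + k), Sdq k dq v) := by
  intro dq
  induction dq with
  | nil => intro active _ hact; simp [kyPop, Sdq, hact]
  | cons p rest ih =>
    intro active hmono hact
    obtain ⟨u, g⟩ := p
    rw [List.pairwise_cons] at hmono
    simp only [kyPop]
    by_cases h : u + k ≤ v
    · rw [if_pos h, ih (active - g) hmono.2 (by simp at hact; omega)]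
      have h2 : ¬ (v < u + k) := by omega
      rw [List.filter_cons, if_neg (by simpa using h2), Sdq_cons, if_neg h2]
      simp
    · rw [if_neg h]
      have hall : ∀ q ∈ (u, g) :: rest, v < q.1 + k := by
        intro q hq
        rcases List.mem_cons.mp hq with rfl | hq'
        · simp; omega
        · have := hmono.1 q hq'; omega
      have hf : ((u, g) :: rest).filter (fun p => v < p.1 + k) = (u, g) :: rest :=
        List.filter_eq_self.mpr (fun q hq => by simpa using hall q hq)
      have hS : Sdq k ((u, g) :: rest) v = active := by
        unfold Sdq; rw [hf, ← hact]
      rw [hf, hS]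

lemma kyInner_none (r : Int) : ∀ (js : List Int) (dct : PySem.Dict Int Int), js.Nodup →
    (∃ j ∈ js, PySem.Dict.contains dct j = false ∨ PySem.Dict.getD dct j 0 < r) →
    kyInner r js dct = none := by
  intro js
  induction js with
  | nil => intro dct _ h; simp at h
  | cons j0 rest ih =>
    intro dct hnd h
    obtain ⟨hj0, hndr⟩ := List.nodup_cons.mp hnd
    by_cases hc : PySem.Dict.contains dct j0 = false
    · simp [kyInner, hc]
    · by_cases hlt : PySem.Dict.getD dct j0 0 < r
      · simp [kyInner, hc, hlt]
      · obtain ⟨j, hjmem, hcond⟩ := h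
        have hjr : j ∈ rest := by
          rcases List.mem_cons.mp hjmem with rfl | h'
          · rcases hcond with h1 | h1
            · exact absurd h1 hc
            · exact absurd h1 hlt
          · exact h'
        have hne : j ≠ j0 := fun e => hj0 (e ▸ hjr)
        simp only [kyInner, if_neg hc, if_neg hlt]
        apply ih _ hndr
        refine ⟨j, hjr, ?_⟩
        rw [PySem.Dict.contains_insert, PySem.Dict.getD_insert_of_ne _ _ _ hne]
        simpa [hne] using hcond

lemma kyInner_some (r : Int) : ∀ (js : List Int) (dct : PySem.Dict Int Int), js.Nodup →
    (∀ j ∈ js, PySem.Dict.contains dct j = true ∧ r ≤ PySem.Dict.getD dct j 0) →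
    ∃ dct', kyInner r js dct = some dct' ∧
      (∀ w, PySem.Dict.contains dct' w = PySem.Dict.contains dct w) ∧
      (∀ w, PySem.Dict.getD dct' w 0 =
        if w ∈ js then PySem.Dict.getD dct w 0 - r else PySem.Dict.getD dct w 0) := by
  intro js
  induction js with
  | nil => intro dct _ _; exact ⟨dct, rfl, fun _ => rfl, by simp⟩
  | cons j0 rest ih =>
    intro dct hnd h
    obtain ⟨hj0, hndr⟩ := List.nodup_cons.mp hnd
    obtain ⟨hc0, hr0⟩ := h j0 List.mem_cons_self
    have hrest : ∀ j ∈ rest,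
        PySem.Dict.contains (PySem.Dict.insert dct j0 (PySem.Dict.getD dct j0 0 - r)) j = true ∧
        r ≤ PySem.Dict.getD (PySem.Dict.insert dct j0 (PySem.Dict.getD dct j0 0 - r)) j 0 := by
      intro j hj
      have hne : j ≠ j0 := fun e => hj0 (e ▸ hj)
      obtain ⟨h1, h2⟩ := h j (List.mem_cons_of_mem _ hj)
      constructor
      · rw [PySem.Dict.contains_insert]; simp [h1]
      · rw [PySem.Dict.getD_insert_of_ne _ _ _ hne]; exact h2
    obtain ⟨dct', heq, hcont, hget⟩ := ih _ hndr hrest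
    refine ⟨dct', ?_, ?_, ?_⟩
    · have h1 : ¬ (PySem.Dict.contains dct j0 = false) := by simp [hc0]
      simp only [kyInner]
      rw [if_neg h1, if_neg (not_lt.mpr hr0)]
      exact heq
    · intro w
      rw [hcont w, PySem.Dict.contains_insert]
      by_cases hw : w = j0 <;> simp [hw, hc0]
    · intro w
      rw [hget w]
      by_cases hw : w ∈ rest
      · have hne : w ≠ j0 := fun e => hj0 (e ▸ hw)
        rw [if_pos hw, if_pos (List.mem_cons_of_mem _ hw),
          PySem.Dict.getD_insert_of_ne _ _ _ hne]
      · rw [if_neg hw]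
        by_cases hw0 : w = j0
        · subst hw0
          rw [PySem.Dict.getD_insert_self, if_pos List.mem_cons_self]
        · rw [PySem.Dict.getD_insert_of_ne _ _ _ hw0,
            if_neg (by simp [hw, hw0])]

lemma gap_le (l : List Int) (hs : l.Pairwise (· < ·)) (a b : Nat) (hab : a ≤ b)
    (hb : b < l.length) :
    l[a]'(lt_of_le_of_lt hab hb) + ((b - a : Nat) : Int) ≤ l[b] := by
  induction b, hab using Nat.le_induction with
  | base => simp
  | succ b hab ih =>
    have hb' : b < l.length := by omega
    have h1 : l[b] < l[b + 1] :=
      List.pairwise_iff_getElem.mp hs b (b + 1) hb' hb (by omega)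
    have h2 := ih hb'
    have h3 : ((b + 1 - a : Nat) : Int) = ((b - a : Nat) : Int) + 1 := by omega
    omega

lemma window_iff (k : Int) (hk : 1 ≤ k) (done rest : List Int) (v : Int)
    (hs : (done ++ v :: rest).Pairwise (· < ·)) :
    (∀ x : Int, v < x → x < v + k → x ∈ done ++ v :: rest) ↔
      (¬ ((done.length : Int) + k - 1 ≥ (((done ++ v :: rest).length : Nat) : Int)) ∧
        PySem.List.pyGet? (done ++ v :: rest) ((done.length : Int) + k - 1)
          = some (v + k - 1)) := by
  have hil : done.length < (done ++ v :: rest).length := by simp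
  have hiv : (done ++ v :: rest)[done.length]'hil = v := by
    rw [List.getElem_append_right (le_refl _)]
    simp
  set l := done ++ v :: rest with hl
  obtain ⟨K, hK⟩ : ∃ K : Nat, k = (K : Int) + 1 := ⟨(k - 1).toNat, by omega⟩
  have hidx : (done.length : Int) + k - 1 = ((done.length + K : Nat) : Int) := by
    push_cast; omega
  constructor
  · intro hwin
    have key : ∀ d : Nat, d ≤ K →
        ∃ t, done.length + d ≤ t ∧ ∃ (ht : t < l.length), l[t] = v + (d : Int) := by
      intro d hd
      induction d with
      | zero => exact ⟨done.length, by omega, hil, by simp only [Nat.cast_zero, add_zero]; exact hiv⟩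
      | succ d ihd =>
        obtain ⟨t, htle, ht, hte⟩ := ihd (by omega)
        have hmem : (v + ((d : Int) + 1)) ∈ l := by
          refine hwin _ (by omega) (by omega)
        obtain ⟨s, hsl, hse⟩ := List.getElem_of_mem hmem
        have hts : t < s := by
          by_contra hc
          have := gap_le l hs s t (by omega) ht
          rw [hse, hte] at this
          omega
        exact ⟨s, by omega, hsl, by rw [hse]; push_cast; ring⟩
    obtain ⟨t, htle, ht, hte⟩ := key K (le_refl _)
    have hjlen : done.length + K < l.length := by omega
    constructor
    · rw [hidx]; push_cast; omega
    · rw [hidx, PySem.List.pyGet?_natCast, List.getElem?_eq_getElem hjlen]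
      have hlow := gap_le l hs done.length (done.length + K) (by omega) hjlen
      have hhigh := gap_le l hs (done.length + K) t htle ht
      rw [hiv] at hlow
      rw [hte] at hhigh
      have hje : l[done.length + K] = v + (K : Int) := by
        have e1 : ((done.length + K - done.length : Nat) : Int) = (K : Int) := by omega
        have e2 : (0 : Int) ≤ ((t - (done.length + K) : Nat) : Int) := by omega
        omega
      rw [hje]
      congr 1
      omega
  · rintro ⟨hlen, hget⟩ x hx1 hx2
    rw [hidx, PySem.List.pyGet?_natCast] at hget
    rw [hidx] at hlen
    have hjlen : done.length + K < l.length := by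
      push_cast at hlen; omega
    rw [List.getElem?_eq_getElem hjlen] at hget
    have hje : l[done.length + K] = v + (K : Int) := by
      have := Option.some.inj hget
      omega
    set d := (x - v).toNat with hd
    have hd1 : 1 ≤ d ∧ d ≤ K := by omega
    have hdl : done.length + d < l.length := by omega
    have hlow := gap_le l hs done.length (done.length + d) (by omega) hdl
    have hhigh := gap_le l hs (done.length + d) (done.length + K) (by omega) hjlen
    rw [hiv] at hlow
    rw [hje] at hhigh
    have hx : l[done.length + d] = x := by
      have e1 : ((done.length + d - done.length : Nat) : Int) = (d : Int) := by omega
      have e2 : ((done.length + K - (done.length + d) : Nat) : Int)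
          = (K : Int) - (d : Int) := by omega
      omega
    rw [← hx]
    exact List.getElem_mem _

lemma sweep_false (ksf : List Int) (cnt : PySem.Dict Int Int) (k : Int) :
    ∀ (es : List (Int × Int)) (dq : List (Int × Int)) (active : Int),
      (es.map Prod.snd).Pairwise (· < ·) →
      active = (dq.map Prod.snd).sum →
      (∀ p ∈ dq, 0 < p.2) →
      dq.Pairwise (fun p q => p.1 < q.1) →
      (∀ p ∈ dq, ∀ w ∈ es.map Prod.snd, p.1 < w) →
      (∃ j ∈ es.map Prod.snd, PySem.Dict.getD cnt j 0 < Sdq k dq j) →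
      kySweep ksf cnt k es dq active = false := by
  intro es
  induction es with
  | nil => intro dq active _ _ _ _ _ hdef; simp at hdef
  | cons e rest ih =>
    intro dq active hsort hact hpos hmono hlt hdef
    obtain ⟨i, v⟩ := e
    simp only [kySweep, kyPop_spec k v dq active hmono hact]
    rw [List.map_cons] at hsort hdef hlt
    have hvrest : ∀ w ∈ rest.map Prod.snd, v < w := by
      intro w hw; exact (List.pairwise_cons.mp hsort).1 w hw
    by_cases hcv : PySem.Dict.getD cnt v 0 < Sdq k dq v
    · rw [if_pos hcv]
    · rw [if_neg hcv]
      obtain ⟨j, hjmem, hjdef⟩ := hdef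
      have hjrest : j ∈ rest.map Prod.snd := by
        rcases List.mem_cons.mp hjmem with rfl | h'
        · exact absurd hjdef hcv
        · exact h'
      have hvj : v < j := hvrest j hjrest
      have hmono1 : (dq.filter (fun p => v < p.1 + k)).Pairwise (fun p q => p.1 < q.1) :=
        hmono.filter _
      have hpos1 : ∀ p ∈ dq.filter (fun p => v < p.1 + k), 0 < p.2 :=
        fun p hp => hpos p (List.mem_of_mem_filter hp)
      have hlt1 : ∀ p ∈ dq.filter (fun p => v < p.1 + k), ∀ w ∈ rest.map Prod.snd, p.1 < w :=
        fun p hp w hw => hlt p (List.mem_of_mem_filter hp) w (List.mem_cons_of_mem _ hw)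
      have hS1 : Sdq k (dq.filter (fun p => v < p.1 + k)) j = Sdq k dq j :=
        Sdq_filter k v j dq (le_of_lt hvj)
      have hsum1 : ((dq.filter (fun p => v < p.1 + k)).map Prod.snd).sum = Sdq k dq v := rfl
      by_cases hop : Sdq k dq v < PySem.Dict.getD cnt v 0
      · rw [if_pos hop]
        by_cases hw1 : i + k - 1 ≥ ((ksf.length : Nat) : Int)
        · rw [if_pos hw1]
        · rw [if_neg hw1]
          by_cases hw2 : PySem.List.pyGet? ksf (i + k - 1) ≠ some (v + k - 1)
          · rw [if_pos hw2]
          · rw [if_neg hw2]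
            apply ih _ _ (List.pairwise_cons.mp hsort).2
            · simp only [List.map_append, List.sum_append, List.map_cons, List.map_nil,
                List.sum_cons, List.sum_nil, hsum1]
              ring
            · intro p hp
              rcases List.mem_append.mp hp with h' | h'
              · exact hpos1 p h'
              · simp only [List.mem_singleton] at h'; subst h'; simp; omega
            · refine List.pairwise_append.mpr ⟨hmono1, List.pairwise_singleton _ _, ?_⟩
              intro a ha b hb
              simp only [List.mem_singleton] at hb; subst hb
              exact hlt a (List.mem_of_mem_filter ha) v List.mem_cons_self
            · intro p hp w hw
              rcases List.mem_append.mp hp with h' | h'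
              · exact hlt1 p h' w hw
              · simp only [List.mem_singleton] at h'; subst h'; exact hvrest w hw
            · refine ⟨j, hjrest, ?_⟩
              rw [Sdq_append_single, hS1]
              have : (0:Int) ≤ (if j < v + k then PySem.Dict.getD cnt v 0 - Sdq k dq v else 0) := by
                split <;> omega
              omega
      · rw [if_neg hop]
        apply ih _ _ (List.pairwise_cons.mp hsort).2 hsum1.symm hpos1 hmono1 hlt1
        exact ⟨j, hjrest, by rw [hS1]; exact hjdef⟩

lemma joint (k : Int) (hk : 1 ≤ k) (cnt : PySem.Dict Int Int) :
    ∀ (rest done : List Int) (dct : PySem.Dict Int Int) (dq : List (Int × Int)) (active : Int),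
      (done ++ rest).Pairwise (· < ·) →
      (∀ j : Int, PySem.Dict.contains cnt j = decide (j ∈ done ++ rest)) →
      (∀ j : Int, PySem.Dict.contains dct j = PySem.Dict.contains cnt j) →
      (∀ w ∈ rest, PySem.Dict.getD dct w 0 = PySem.Dict.getD cnt w 0 - Sdq k dq w) →
      (∀ w ∈ rest, 0 ≤ PySem.Dict.getD dct w 0) →
      active = (dq.map Prod.snd).sum →
      (∀ p ∈ dq, 0 < p.2) →
      dq.Pairwise (fun p q => p.1 < q.1) →
      (∀ p ∈ dq, ∀ w ∈ rest, p.1 < w) →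
      kyOuter k rest dct = kySweep (done ++ rest) cnt k
        (PySem.List.enumerate rest ((done.length : Nat) : Int)) dq active := by
  intro rest
  induction rest with
  | nil =>
    intro done dct dq active _ _ _ _ _ _ _ _ _
    simp [kyOuter, kySweep, PySem.List.enumerate_nil]
  | cons v rest ih =>
    intro done dct dq active hsort hmem hkeys hval hnn hact hpos hmono hlt
    have hshape : (done ++ [v]) ++ rest = done ++ v :: rest := by simp
    have hvrest : ∀ w ∈ rest, v < w := by
      have hsub : (v :: rest).Pairwise (· < ·) :=
        List.Pairwise.sublist (List.sublist_append_right done (v :: rest)) hsort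
      exact (List.pairwise_cons.mp hsub).1
    have hdonev : ∀ a ∈ done, a < v := by
      have h3 := (List.pairwise_append.mp hsort).2.2
      intro a ha; exact h3 a ha v List.mem_cons_self
    rw [PySem.List.enumerate_cons]
    simp only [kySweep, kyPop_spec k v dq active hmono hact]
    have hr : PySem.Dict.getD dct v 0 = PySem.Dict.getD cnt v 0 - Sdq k dq v :=
      hval v List.mem_cons_self
    have hrnn : 0 ≤ PySem.Dict.getD dct v 0 := hnn v List.mem_cons_self
    have hno : ¬ (PySem.Dict.getD cnt v 0 < Sdq k dq v) := by omega
    rw [if_neg hno]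
    have hsum1 : ((dq.filter (fun p => v < p.1 + k)).map Prod.snd).sum = Sdq k dq v := rfl
    have hmono1 : (dq.filter (fun p => v < p.1 + k)).Pairwise (fun p q => p.1 < q.1) :=
      hmono.filter _
    have hpos1 : ∀ p ∈ dq.filter (fun p => v < p.1 + k), 0 < p.2 :=
      fun p hp => hpos p (List.mem_of_mem_filter hp)
    have hlt1 : ∀ p ∈ dq.filter (fun p => v < p.1 + k), ∀ w ∈ rest, p.1 < w :=
      fun p hp w hw => hlt p (List.mem_of_mem_filter hp) w (List.mem_cons_of_mem _ hw)
    have hlen1 : (((done ++ [v]).length : Nat) : Int) = ((done.length : Nat) : Int) + 1 := by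
      simp
    by_cases hopen : Sdq k dq v < PySem.Dict.getD cnt v 0
    · -- dct[v] > 0 : A opens groups at v
      rw [if_pos hopen]
      simp only [kyOuter, if_pos (show 0 < PySem.Dict.getD dct v 0 by omega)]
      by_cases hwin : ∀ x : Int, v < x → x < v + k → x ∈ done ++ v :: rest
      · obtain ⟨hlen, hget⟩ := (window_iff k hk done rest v hsort).mp hwin
        rw [if_neg hlen, if_neg (by simpa using hget)]
        have hpres : ∀ j ∈ PySem.List.pyRange (v + 1) (v + k) 1,
            PySem.Dict.contains dct j = true := by
          intro j hj
          rw [PySem.List.mem_pyRange_one] at hj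
          have hjm : j ∈ done ++ v :: rest := hwin j (by omega) hj.2
          rw [hkeys, hmem]
          exact decide_eq_true hjm
        by_cases hcnt : ∀ j ∈ PySem.List.pyRange (v + 1) (v + k) 1,
            PySem.Dict.getD dct v 0 ≤ PySem.Dict.getD dct j 0
        · -- both proceed
          obtain ⟨dct', heq, hcont, hget'⟩ :=
            kyInner_some (PySem.Dict.getD dct v 0) (PySem.List.pyRange (v + 1) (v + k) 1) dct
              (PySem.List.nodup_pyRange_one _ _)
              (fun j hj => ⟨hpres j hj, hcnt j hj⟩)
          rw [heq]
          have hgoal := ih (done ++ [v]) dct'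
            (dq.filter (fun p => v < p.1 + k) ++ [(v, PySem.Dict.getD cnt v 0 - Sdq k dq v)])
            (PySem.Dict.getD cnt v 0)
            (by rw [hshape]; exact hsort)
            (by intro j; rw [hshape]; exact hmem j)
            (fun j => (hcont j).trans (hkeys j))
            (by
              intro w hw
              have hvw : v < w := hvrest w hw
              rw [hget' w, Sdq_append_single,
                Sdq_filter k v w dq (le_of_lt hvw)]
              by_cases hwk : w < v + k
              · rw [if_pos (by rw [PySem.List.mem_pyRange_one]; omega), if_pos hwk,
                  hval w (List.mem_cons_of_mem _ hw)]
                omega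
              · rw [if_neg (by rw [PySem.List.mem_pyRange_one]; omega), if_neg hwk,
                  hval w (List.mem_cons_of_mem _ hw)]
                omega)
            (by
              intro w hw
              rw [hget' w]
              by_cases hwj : w ∈ PySem.List.pyRange (v + 1) (v + k) 1
              · rw [if_pos hwj]
                have := hcnt w hwj
                omega
              · rw [if_neg hwj]
                exact hnn w (List.mem_cons_of_mem _ hw))
            (by
              simp only [List.map_append, List.sum_append, List.map_cons, List.map_nil,
                List.sum_cons, List.sum_nil, hsum1]
              ring)
            (by
              intro p hp
              rcases List.mem_append.mp hp with h' | h'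
              · exact hpos1 p h'
              · simp only [List.mem_singleton] at h'; subst h'; simp; omega)
            (by
              refine List.pairwise_append.mpr ⟨hmono1, List.pairwise_singleton _ _, ?_⟩
              intro a ha b hb
              simp only [List.mem_singleton] at hb; subst hb
              exact hlt a (List.mem_of_mem_filter ha) v List.mem_cons_self)
            (by
              intro p hp w hw
              rcases List.mem_append.mp hp with h' | h'
              · exact hlt1 p h' w hw
              · simp only [List.mem_singleton] at h'; subst h'; exact hvrest w hw)
          rw [hshape, hlen1] at hgoal
          exact hgoal
        · -- A fails a count check; B fails further on
          push_neg at hcnt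
          obtain ⟨j0, hj0mem, hj0⟩ := hcnt
          rw [kyInner_none (PySem.Dict.getD dct v 0) (PySem.List.pyRange (v + 1) (v + k) 1) dct
            (PySem.List.nodup_pyRange_one _ _) ⟨j0, hj0mem, Or.inr hj0⟩]
          have hj0r : v + 1 ≤ j0 ∧ j0 < v + k := PySem.List.mem_pyRange_one.mp hj0mem
          have hj0mem' : j0 ∈ rest := by
            have hin : j0 ∈ done ++ v :: rest := hwin j0 (by omega) hj0r.2
            rcases List.mem_append.mp hin with h' | h'
            · exact absurd (hdonev j0 h') (by omega)
            · rcases List.mem_cons.mp h' with rfl | h''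
              · omega
              · exact h''
          refine (sweep_false (done ++ v :: rest) cnt k
            (PySem.List.enumerate rest (((done.length : Nat) : Int) + 1))
            (dq.filter (fun p => v < p.1 + k) ++ [(v, PySem.Dict.getD cnt v 0 - Sdq k dq v)])
            (PySem.Dict.getD cnt v 0) ?_ ?_ ?_ ?_ ?_ ?_).symm
          · rw [PySem.List.map_snd_enumerate]
            exact (List.pairwise_cons.mp (List.Pairwise.sublist
              (List.sublist_append_right done (v :: rest)) hsort)).2
          · simp only [List.map_append, List.sum_append, List.map_cons, List.map_nil,
              List.sum_cons, List.sum_nil, hsum1]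
            ring
          · intro p hp
            rcases List.mem_append.mp hp with h' | h'
            · exact hpos1 p h'
            · simp only [List.mem_singleton] at h'; subst h'; simp; omega
          · refine List.pairwise_append.mpr ⟨hmono1, List.pairwise_singleton _ _, ?_⟩
            intro a ha b hb
            simp only [List.mem_singleton] at hb; subst hb
            exact hlt a (List.mem_of_mem_filter ha) v List.mem_cons_self
          · intro p hp w hw
            rw [PySem.List.map_snd_enumerate] at hw
            rcases List.mem_append.mp hp with h' | h'
            · exact hlt1 p h' w hw
            · simp only [List.mem_singleton] at h'; subst h'; exact hvrest w hw
          · refine ⟨j0, by rw [PySem.List.map_snd_enumerate]; exact hj0mem', ?_⟩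
            rw [Sdq_append_single, Sdq_filter k v j0 dq (by omega), if_pos hj0r.2]
            have := hval j0 (List.mem_cons_of_mem _ hj0mem')
            omega
      · -- window missing : both fail here
        push_neg at hwin
        obtain ⟨x, hx1, hx2, hx3⟩ := hwin
        rw [kyInner_none (PySem.Dict.getD dct v 0) (PySem.List.pyRange (v + 1) (v + k) 1) dct
          (PySem.List.nodup_pyRange_one _ _)
          ⟨x, PySem.List.mem_pyRange_one.mpr (by omega), Or.inl (by
            rw [hkeys, hmem]; exact decide_eq_false hx3)⟩]
        by_cases hw1 : ((done.length : Nat) : Int) + k - 1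
            ≥ (((done ++ v :: rest).length : Nat) : Int)
        · rw [if_pos hw1]
        · rw [if_neg hw1]
          have hw2 : PySem.List.pyGet? (done ++ v :: rest) (((done.length : Nat) : Int) + k - 1)
              ≠ some (v + k - 1) := by
            intro he
            have hwin' := (window_iff k hk done rest v hsort).mpr ⟨hw1, he⟩
            exact hx3 (hwin' x hx1 hx2)
          rw [if_pos hw2]
    · -- dct[v] = 0 : A skips, B opens nothing
      rw [if_neg hopen]
      simp only [kyOuter, if_neg (show ¬ 0 < PySem.Dict.getD dct v 0 by omega)]
      have hgoal := ih (done ++ [v]) dct (dq.filter (fun p => v < p.1 + k)) (Sdq k dq v)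
        (by rw [hshape]; exact hsort)
        (by intro j; rw [hshape]; exact hmem j)
        hkeys
        (by
          intro w hw
          rw [Sdq_filter k v w dq (le_of_lt (hvrest w hw))]
          exact hval w (List.mem_cons_of_mem _ hw))
        (fun w hw => hnn w (List.mem_cons_of_mem _ hw))
        hsum1.symm hpos1 hmono1 hlt1
      rw [hshape, hlen1] at hgoal
      exact hgoal

theorem ky_spec_main : ∀ (nums : List Int) (k : Int), 1 ≤ k → ky nums k = ky_alt nums k := by
  intro nums k hk
  unfold ky ky_alt
  by_cases hg : PySem.Int.mod (nums.length : Int) k ≠ 0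
  · rw [if_pos hg, if_pos hg]
  · rw [if_neg hg, if_neg hg]
    have hc0 : ∀ w : Int, 0 ≤ PySem.Dict.getD (PySem.Dict.counter nums) w 0 := by
      intro w
      rw [PySem.Dict.getD_counter]
      exact Int.natCast_nonneg _
    have hsort : (PySem.List.sorted (PySem.Dict.keys (PySem.Dict.counter nums))
        (fun x => x) false).Pairwise (· < ·) := by
      rw [PySem.Dict.keys_counter]
      exact PySem.List.sorted_ofList_pairwise_lt nums
    have hmem : ∀ j : Int, PySem.Dict.contains (PySem.Dict.counter nums) j =
        decide (j ∈ PySem.List.sorted (PySem.Dict.keys (PySem.Dict.counter nums))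
          (fun x => x) false) := by
      intro j
      rw [PySem.Dict.contains_counter]
      by_cases hj : j ∈ nums
      · simp [PySem.List.mem_sorted, PySem.Dict.keys_counter, PySem.Set.mem_ofList, hj]
      · simp [PySem.List.mem_sorted, PySem.Dict.keys_counter, PySem.Set.mem_ofList, hj]
    have hj := joint k hk (PySem.Dict.counter nums)
      (PySem.List.sorted (PySem.Dict.keys (PySem.Dict.counter nums)) (fun x => x) false)
      [] (PySem.Dict.counter nums) [] 0
      (by rw [List.nil_append]; exact hsort)
      (by intro j; rw [List.nil_append]; exact hmem j)
      (fun j => rfl)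
      (by intro w _; simp [Sdq])
      (fun w _ => hc0 w)
      rfl
      (by intro p hp; simp at hp)
      List.Pairwise.nil
      (by intro p hp; simp at hp)
    rw [List.nil_append] at hj
    simpa using hj

-- ===== VERDICT (by name: the statement is the Claim_ definition above) =====
theorem ky_spec : Claim_equal_ky := by
  intro nums k _ hpre
  unfold Spec_ky
  unfold Pre_ky at hpre
  by_cases hg : PySem.Int.mod (nums.length : Int) k ≠ 0
  · unfold ky ky_alt
    rw [if_pos hg, if_pos hg]
  · have hk : 1 ≤ k := by
      rcases hpre with h | h
      · exact h
      · exact absurd h.2 (by simpa using hg)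
    exact ky_spec_main nums k hk
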